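-- pv_equiv track=rewrite | github.com/stefantaubert/tacotron2 | src/core/pre/text/text_selection/helper.py | contains_all
-- ===== SOURCE A (Python) =====
-- from typing import Dict, List, Set, Tuple, Type, TypeVar, Union
--
-- _T = TypeVar('_T')
--
-- def contains_all(text_data_diphones: List[Union[Set[_T], List[_T]]], which_should_contained: Set[_T]) -> Tuple[bool, Set[_T]]:
--   rest = which_should_contained
--   for which_should_contained in text_data_diphones:
--     new_rest = rest.difference(set(which_should_contained))
--     rest = new_rest
--     if len(rest) == 0:
--       return True, rest
--   return False, rest
-- ===== SOURCE B (Python) =====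
-- def contains_all(text_data_diphones, which_should_contained):
--   covered = set().union(*(set(c) for c in text_data_diphones))
--   rest = which_should_contained - covered
--   return len(text_data_diphones) > 0 and len(rest) == 0, rest
-- ===== Notes on version B (the rewrite author's own statement) =====
-- stated objective: simpler
-- what changed: Replaces A's incremental subtract-and-early-exit loop over the collections with building the combined coverage set once by union and taking a single set difference; the success flag is 'some collection exists and nothing is left'.
import Mathlib
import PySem

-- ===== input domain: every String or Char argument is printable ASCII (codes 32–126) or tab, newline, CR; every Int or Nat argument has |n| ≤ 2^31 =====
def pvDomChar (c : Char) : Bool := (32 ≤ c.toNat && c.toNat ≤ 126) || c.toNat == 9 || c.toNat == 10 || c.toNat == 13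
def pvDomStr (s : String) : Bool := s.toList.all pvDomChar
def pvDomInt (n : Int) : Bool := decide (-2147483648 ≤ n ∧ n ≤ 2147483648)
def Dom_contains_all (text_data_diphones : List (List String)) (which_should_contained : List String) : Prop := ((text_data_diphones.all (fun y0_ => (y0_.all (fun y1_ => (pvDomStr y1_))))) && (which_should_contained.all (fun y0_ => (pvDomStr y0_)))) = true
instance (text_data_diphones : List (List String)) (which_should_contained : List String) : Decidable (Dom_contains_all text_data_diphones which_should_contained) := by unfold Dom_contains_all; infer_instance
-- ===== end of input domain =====

-- B builds the combined coverage set once by union and takes a single set difference,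
-- replacing A's incremental subtract-and-early-exit loop (objective: simpler).


-- ===== PORT A =====
-- 'for which_should_contained in text_data_diphones: new_rest = rest.difference(set(...)); if len(rest)==0: return True, rest'
def containsAllLoop (tds : List (List String)) (rest : PySem.Set String) : Bool × List String :=
  match tds with
  | [] => (false, rest)
  | c :: cs =>
    let newRest := PySem.Set.diff rest (PySem.Set.ofList c)
    if newRest.length = 0 then (true, newRest) else containsAllLoop cs newRest

def contains_all (text_data_diphones : List (List String)) (which_should_contained : List String) : Bool × List String :=
  containsAllLoop text_data_diphones which_should_contained

-- ===== PORT B =====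
def contains_all_alt (text_data_diphones : List (List String)) (which_should_contained : List String) : Bool × List String :=
  let covered := text_data_diphones.foldl (fun acc c => PySem.Set.union acc (PySem.Set.ofList c)) PySem.Set.empty
  let rest := PySem.Set.diff which_should_contained covered
  (decide (0 < text_data_diphones.length) && decide (rest.length = 0), rest)

-- ===== PRECONDITION & SPEC =====
def Spec_contains_all (text_data_diphones : List (List String)) (which_should_contained : List String) (out : Bool × List String) : Prop := out = contains_all_alt text_data_diphones which_should_contained
instance (text_data_diphones : List (List String)) (which_should_contained : List String) (out : Bool × List String) : Decidable (Spec_contains_all text_data_diphones which_should_contained out) := by unfold Spec_contains_all; infer_instance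

-- ===== CLAIM (what is proved, stated in full; the proofs are below) =====
def Claim_equal_contains_all : Prop := ∀ (text_data_diphones : List (List String)) (which_should_contained : List String), Dom_contains_all text_data_diphones which_should_contained → Spec_contains_all text_data_diphones which_should_contained (contains_all text_data_diphones which_should_contained)

-- ===== LEMMAS AND PROOFS =====

-- subtracting s then t is subtracting s ∪ t (same list, not just same members)
theorem diff_diff_union (r s t : PySem.Set String) :
    PySem.Set.diff (PySem.Set.diff r s) t = PySem.Set.diff r (PySem.Set.union s t) := by
  simp only [PySem.Set.diff, List.filter_filter]
  apply List.filter_congr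
  intro x _
  have hu : x ∈ PySem.Set.union s t ↔ x ∈ s ∨ x ∈ t := PySem.Set.mem_union s t x
  simp only [PySem.Set.contains_eq_listContains] at *
  by_cases hs : x ∈ s <;> by_cases ht : x ∈ t <;> simp_all

theorem diff_empty (r : PySem.Set String) : PySem.Set.diff r PySem.Set.empty = r := by
  simp [PySem.Set.diff, PySem.Set.empty]

-- the iterated subtraction equals one subtraction of the accumulated union
theorem foldl_diff_eq_diff_union (tds : List (List String)) (r acc : PySem.Set String) :
    tds.foldl (fun rr c => PySem.Set.diff rr (PySem.Set.ofList c)) (PySem.Set.diff r acc)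
      = PySem.Set.diff r (tds.foldl (fun a c => PySem.Set.union a (PySem.Set.ofList c)) acc) := by
  induction tds generalizing acc with
  | nil => rfl
  | cons c cs ih =>
    simp only [List.foldl_cons, diff_diff_union]
    exact ih (PySem.Set.union acc (PySem.Set.ofList c))

theorem foldl_diff_nil (tds : List (List String)) :
    tds.foldl (fun rr c => PySem.Set.diff rr (PySem.Set.ofList c)) [] = [] := by
  induction tds with
  | nil => rfl
  | cons c cs ih => simpa [PySem.Set.diff] using ih

-- A's loop computes the final subtraction, with flag "list nonempty and final rest empty"
theorem containsAllLoop_eq (tds : List (List String)) (r : PySem.Set String) :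
    containsAllLoop tds r =
      (decide (0 < tds.length) &&
         decide ((tds.foldl (fun rr c => PySem.Set.diff rr (PySem.Set.ofList c)) r).length = 0),
       tds.foldl (fun rr c => PySem.Set.diff rr (PySem.Set.ofList c)) r) := by
  induction tds generalizing r with
  | nil => simp [containsAllLoop]
  | cons c cs ih =>
    simp only [containsAllLoop, List.foldl_cons]
    by_cases h : (PySem.Set.diff r (PySem.Set.ofList c)).length = 0
    · have hnil : PySem.Set.diff r (PySem.Set.ofList c) = [] := List.eq_nil_of_length_eq_zero h
      simp [hnil, foldl_diff_nil]
    · cases cs with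
      | nil => simp [containsAllLoop, h]
      | cons d ds => simp [h, ih]

-- ===== VERDICT (by name: the statement is the Claim_ definition above) =====
theorem contains_all_spec : Claim_equal_contains_all := by
  intro tds wsc _
  show contains_all tds wsc = contains_all_alt tds wsc
  unfold contains_all contains_all_alt
  rw [containsAllLoop_eq]
  have h := foldl_diff_eq_diff_union tds wsc PySem.Set.empty
  rw [diff_empty] at h
  rw [h]
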